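-- pv_equiv track=rewrite | github.com/PrathyushaMyla2005/dsa-arrays-master | Stock-Buy-Sell.py | maxProfitBrute
-- ===== SOURCE A (Python) =====
-- def maxProfitBrute(prices):
--     """
--     Brute Force Approach
--     Time Complexity: O(n^2)
--     Space Complexity: O(1)
--     """
--     n = len(prices)          # Total days
--     max_profit = 0           # Initialize profit
--
--     # Try all buy-sell pairs
--     for i in range(n-1):          # Buy day
--         for j in range(i+1, n):   # Sell day
--             if prices[j] > prices[i]:         # Only profitable transactions
--                 profit = prices[j] - prices[i]
--                 max_profit += profit           # Add to total
--
--     return max_profit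
-- ===== SOURCE B (Python) =====
-- def maxProfitBrute(prices):
--     # Maintain a sorted list of previously seen prices; for each day add
--     # count(smaller earlier)*price - sum(smaller earlier) in one scan, then
--     # insert the price at its sorted position.
--     seen = []
--     total = 0
--     for p in prices:
--         k = 0
--         acc = 0
--         while k < len(seen) and seen[k] < p:
--             acc += seen[k]
--             k += 1
--         total += k * p - acc
--         seen.insert(k, p)
--     return total
-- ===== Notes on version B (the rewrite author's own statement) =====
-- stated objective: alternative
-- what changed: Replaced A's all-pairs double loop by a single left-to-right pass that keeps the already-seen prices in a sorted list and, for each day, adds count*price - sum over the smaller earlier prices found by one prefix scan of the sorted list.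
import Mathlib
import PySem

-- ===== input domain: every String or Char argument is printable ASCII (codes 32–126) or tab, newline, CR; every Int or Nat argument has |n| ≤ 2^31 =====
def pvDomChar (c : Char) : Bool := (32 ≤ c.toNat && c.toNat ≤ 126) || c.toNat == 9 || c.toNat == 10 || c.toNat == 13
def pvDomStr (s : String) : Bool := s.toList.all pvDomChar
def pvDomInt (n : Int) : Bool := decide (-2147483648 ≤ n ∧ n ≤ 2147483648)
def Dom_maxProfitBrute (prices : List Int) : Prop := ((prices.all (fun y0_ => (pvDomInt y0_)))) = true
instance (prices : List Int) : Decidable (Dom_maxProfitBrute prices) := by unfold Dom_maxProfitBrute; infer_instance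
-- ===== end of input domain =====

-- B replaces A's all-pairs double loop by a single pass that keeps a sorted list of
-- earlier prices and adds count*price - sum over the smaller earlier prices (objective: alternative).


-- ===== PORT A =====
def maxProfitBrute (prices : List Int) : Int :=
  let n : Int := PySem.List.len prices
  (PySem.List.pyRange 0 (n - 1) 1).foldl (fun mp i =>
    (PySem.List.pyRange (i + 1) n 1).foldl (fun mp j =>
      if PySem.List.pyGetD prices i 0 < PySem.List.pyGetD prices j 0 then
        mp + (PySem.List.pyGetD prices j 0 - PySem.List.pyGetD prices i 0)
      else mp) mp) 0

-- ===== PORT B =====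
-- the 'while k < len(seen) and seen[k] < p' scan: returns (k, acc)
def pvScanLt : List Int → Int → Int × Int
  | [], _ => (0, 0)
  | s :: rest, p =>
    if s < p then
      let r := pvScanLt rest p
      (r.1 + 1, r.2 + s)
    else (0, 0)

def maxProfitBrute_alt (prices : List Int) : Int :=
  (prices.foldl (fun (st : List Int × Int) p =>
      let r := pvScanLt st.1 p
      (PySem.List.insert st.1 r.1 p, st.2 + (r.1 * p - r.2)))
    ([], 0)).2

-- ===== PRECONDITION & SPEC =====
def Spec_maxProfitBrute (prices : List Int) (out : Int) : Prop := out = maxProfitBrute_alt prices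
instance (prices : List Int) (out : Int) : Decidable (Spec_maxProfitBrute prices out) := by unfold Spec_maxProfitBrute; infer_instance

-- ===== CLAIM (what is proved, stated in full; the proofs are below) =====
def Claim_equal_maxProfitBrute : Prop := ∀ (prices : List Int), Dom_maxProfitBrute prices → Spec_maxProfitBrute prices (maxProfitBrute prices)

-- ===== LEMMAS AND PROOFS =====

-- profit contributed by buy price x against the later prices ys
def pvInner (x : Int) (ys : List Int) : Int := (ys.map (fun y => if x < y then y - x else 0)).sum
-- the mathematical value: sum over all increasing pairs
def pvS : List Int → Int
  | [] => 0
  | x :: rest => pvInner x rest + pvS rest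
-- profit contributed by sell price p against the earlier prices ys
def pvContrib (p : Int) (ys : List Int) : Int := (ys.map (fun y => if y < p then p - y else 0)).sum

lemma pvS_append (ps : List Int) (p : Int) : pvS (ps ++ [p]) = pvS ps + pvContrib p ps := by
  induction ps with
  | nil => simp [pvS, pvInner, pvContrib]
  | cons x t ih =>
    simp only [List.cons_append, pvS, ih, pvInner, pvContrib, List.map_append, List.sum_append,
      List.map_cons, List.sum_cons, List.map_nil, List.sum_nil]
    ring

-- A equals pvS ------------------------------------------------------------

lemma sum_range_inner (xs : List Int) :
    ((List.range xs.length).map (fun k => pvInner (xs.getD k 0) (xs.drop (k + 1)))).sum = pvS xs := by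
  induction xs with
  | nil => simp [pvS]
  | cons x rest ih =>
    rw [List.length_cons, List.range_succ_eq_map, List.map_cons, List.map_map, List.sum_cons, pvS]
    have h1 : pvInner ((x :: rest).getD 0 0) ((x :: rest).drop (0 + 1)) = pvInner x rest := by
      simp
    have h2 : (List.map ((fun k => pvInner ((x :: rest).getD k 0) ((x :: rest).drop (k + 1))) ∘ Nat.succ)
        (List.range rest.length)).sum = pvS rest := by
      rw [← ih]
      apply congrArg
      apply List.map_congr_left
      intro k _
      simp [Function.comp]
    rw [h1, h2]

lemma sum_range_pred (xs : List Int) :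
    ((List.range (xs.length - 1)).map (fun k => pvInner (xs.getD k 0) (xs.drop (k + 1)))).sum
      = pvS xs := by
  cases xs with
  | nil => simp [pvS]
  | cons x rest =>
    rw [← sum_range_inner]
    simp only [List.length_cons, Nat.add_sub_cancel]
    have hd : (x :: rest).drop (rest.length + 1) = [] := List.drop_eq_nil_of_le (by simp)
    rw [List.range_succ, List.map_append, List.sum_append, List.map_singleton, List.sum_singleton, hd]
    simp [pvInner]

lemma A_eq_S (prices : List Int) : maxProfitBrute prices = pvS prices := by
  unfold maxProfitBrute
  simp only [PySem.List.len_eq]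
  have hcongr : ∀ (acc : Int), ∀ i ∈ PySem.List.pyRange 0 ((prices.length : Int) - 1) 1,
      (PySem.List.pyRange (i + 1) ((prices.length : Int)) 1).foldl (fun mp j =>
        if PySem.List.pyGetD prices i 0 < PySem.List.pyGetD prices j 0 then
          mp + (PySem.List.pyGetD prices j 0 - PySem.List.pyGetD prices i 0)
        else mp) acc
      = acc + pvInner (PySem.List.pyGetD prices i 0) (prices.drop (i + 1).toNat) := by
    intro acc i hi
    have h0 : (0 : Int) ≤ i + 1 := by
      have := (PySem.List.mem_pyRange_one.mp hi).1; omega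
    rw [PySem.List.foldl_pyRange_pyGetD' prices 0
      (fun mp y => if PySem.List.pyGetD prices i 0 < y then mp + (y - PySem.List.pyGetD prices i 0) else mp)
      acc h0]
    rw [PySem.List.foldl_congr_mem _ _
      (fun mp y => mp + (if PySem.List.pyGetD prices i 0 < y then y - PySem.List.pyGetD prices i 0 else 0))
      acc (by intro a y _; dsimp only; split_ifs <;> ring)]
    rw [PySem.List.foldl_add]
    rfl
  rw [PySem.List.foldl_congr_mem _ _
    (fun mp i => mp + pvInner (PySem.List.pyGetD prices i 0) (prices.drop (i + 1).toNat)) 0 hcongr]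
  rw [PySem.List.foldl_add, PySem.List.pyRange_one, List.map_map, zero_add]
  have hlen : ((prices.length : Int) - 1 - 0).toNat = prices.length - 1 := by omega
  rw [hlen]
  have hmap : List.map ((fun i => pvInner (PySem.List.pyGetD prices i 0) (prices.drop (i + 1).toNat))
        ∘ (fun k : Nat => (0 : Int) + k)) (List.range (prices.length - 1))
      = List.map (fun k => pvInner (prices.getD k 0) (prices.drop (k + 1)))
        (List.range (prices.length - 1)) := by
    apply List.map_congr_left
    intro k _
    show pvInner (PySem.List.pyGetD prices (0 + (k : Int)) 0) (prices.drop ((0 + (k : Int)) + 1).toNat) = _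
    rw [show (0 + (k : Int)) = (k : Int) from by ring, PySem.List.pyGetD_natCast,
      show ((k : Int) + 1).toNat = k + 1 from by omega]
  rw [hmap, sum_range_pred]

-- B equals pvS ------------------------------------------------------------

lemma pvScanLt_eq (seen : List Int) (p : Int) :
    pvScanLt seen p =
      (((seen.takeWhile (fun y => decide (y < p))).length : Int),
        (seen.takeWhile (fun y => decide (y < p))).sum) := by
  induction seen with
  | nil => rfl
  | cons s rest ih =>
    by_cases h : s < p
    · simp [pvScanLt, h, ih]; ring
    · simp [pvScanLt, h]

lemma takeWhile_eq_filter_of_sorted (p : Int) (seen : List Int)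
    (hs : seen.Pairwise (· ≤ ·)) :
    seen.takeWhile (fun y => decide (y < p)) = seen.filter (fun y => decide (y < p)) := by
  induction seen with
  | nil => rfl
  | cons s rest ih =>
    rcases List.pairwise_cons.mp hs with ⟨hall, hrest⟩
    by_cases h : s < p
    · simp [h, ih hrest]
    · have : ∀ y ∈ rest, ¬ y < p := fun y hy => by have := hall y hy; omega
      simp only [List.takeWhile_cons, List.filter_cons, h, decide_false]
      simp only [Bool.false_eq_true, if_false]
      rw [List.filter_eq_nil_iff.mpr (by intro y hy; simpa using this y hy)]

lemma contrib_eq (p : Int) (ys : List Int) :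
    pvContrib p ys = ((ys.filter (fun y => decide (y < p))).length : Int) * p
      - (ys.filter (fun y => decide (y < p))).sum := by
  induction ys with
  | nil => simp [pvContrib]
  | cons y t ih =>
    by_cases h : y < p
    · simp [pvContrib, h, List.map_cons] at *
      rw [ih]; ring
    · simp [pvContrib, h, List.map_cons] at *
      rw [ih]

lemma contrib_perm (p : Int) {xs ys : List Int} (h : xs.Perm ys) :
    pvContrib p xs = pvContrib p ys := by
  unfold pvContrib
  exact List.Perm.sum_eq (List.Perm.map _ h)

lemma take_len_takeWhile {α : Type} (q : α → Bool) (l : List α) :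
    l.take (l.takeWhile q).length = l.takeWhile q := by
  induction l with
  | nil => rfl
  | cons x t ih =>
    by_cases h : q x
    · simp [h, ih]
    · simp [h]

lemma drop_len_takeWhile {α : Type} (q : α → Bool) (l : List α) :
    l.drop (l.takeWhile q).length = l.dropWhile q := by
  induction l with
  | nil => rfl
  | cons x t ih =>
    by_cases h : q x
    · simp [h, ih]
    · simp [h]

lemma dropWhile_ge (p : Int) (seen : List Int) (hs : seen.Pairwise (· ≤ ·)) :
    ∀ y ∈ seen.dropWhile (fun y => decide (y < p)), p ≤ y := by
  induction seen with
  | nil => simp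
  | cons s rest ih =>
    rcases List.pairwise_cons.mp hs with ⟨hall, hrest⟩
    by_cases h : s < p
    · simpa [h] using ih hrest
    · intro y hy
      simp only [List.dropWhile_cons, decide_eq_true_eq, h, if_false] at hy
      rcases List.mem_cons.mp hy with rfl | hy
      · omega
      · have := hall y hy; omega

-- the B step preserves: seen is a sorted permutation of the processed prefix, total = pvS prefix
lemma step_invariant (seen : List Int) (p : Int)
    (hs : seen.Pairwise (· ≤ ·)) :
    (PySem.List.insert seen (pvScanLt seen p).1 p).Perm (p :: seen) ∧
    (PySem.List.insert seen (pvScanLt seen p).1 p).Pairwise (· ≤ ·) ∧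
    (pvScanLt seen p).1 * p - (pvScanLt seen p).2 = pvContrib p seen := by
  have htw := takeWhile_eq_filter_of_sorted p seen hs
  have hsc := pvScanLt_eq seen p
  set tw := seen.takeWhile (fun y => decide (y < p)) with htwdef
  have hlen : tw.length ≤ seen.length := by
    simpa [htwdef] using (List.takeWhile_sublist (l := seen) (fun y => decide (y < p))).length_le
  have hins : PySem.List.insert seen ((tw.length : Int)) p =
      seen.take tw.length ++ p :: seen.drop tw.length :=
    PySem.List.insert_natCast seen tw.length p hlen
  rw [hsc]
  simp only
  rw [hins, take_len_takeWhile, drop_len_takeWhile]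
  refine ⟨?_, ?_, ?_⟩
  · have h := List.perm_middle (a := p) (l₁ := seen.takeWhile (fun y => decide (y < p)))
      (l₂ := seen.dropWhile (fun y => decide (y < p)))
    rw [List.takeWhile_append_dropWhile] at h
    exact h
  · apply List.pairwise_append.mpr
    refine ⟨List.Pairwise.sublist (List.takeWhile_sublist _) hs, ?_, ?_⟩
    · apply List.pairwise_cons.mpr
      exact ⟨dropWhile_ge p seen hs, List.Pairwise.sublist (List.dropWhile_sublist _) hs⟩
    · intro a ha b hb
      have ha' := List.mem_takeWhile_imp ha
      simp only [decide_eq_true_eq] at ha' 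
      rcases List.mem_cons.mp hb with rfl | hb
      · omega
      · have := dropWhile_ge p seen hs b hb; omega
  · rw [contrib_eq, ← htw]

lemma B_invariant (ps : List Int) :
    (ps.foldl (fun (st : List Int × Int) p =>
      let r := pvScanLt st.1 p
      (PySem.List.insert st.1 r.1 p, st.2 + (r.1 * p - r.2))) ([], 0)).1.Perm ps ∧
    (ps.foldl (fun (st : List Int × Int) p =>
      let r := pvScanLt st.1 p
      (PySem.List.insert st.1 r.1 p, st.2 + (r.1 * p - r.2))) ([], 0)).1.Pairwise (· ≤ ·) ∧
    (ps.foldl (fun (st : List Int × Int) p =>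
      let r := pvScanLt st.1 p
      (PySem.List.insert st.1 r.1 p, st.2 + (r.1 * p - r.2))) ([], 0)).2 = pvS ps := by
  induction ps using List.reverseRecOn with
  | nil => simp [pvS]
  | append_singleton ps p ih =>
    rcases ih with ⟨hperm, hsort, htot⟩
    rw [List.foldl_append]
    simp only [List.foldl_cons, List.foldl_nil]
    set st := (ps.foldl (fun (st : List Int × Int) p =>
      let r := pvScanLt st.1 p
      (PySem.List.insert st.1 r.1 p, st.2 + (r.1 * p - r.2))) ([], 0)) with hst
    obtain ⟨h1, h2, h3⟩ := step_invariant st.1 p hsort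
    refine ⟨?_, h2, ?_⟩
    · exact h1.trans ((hperm.cons p).trans (List.perm_append_comm (l₁ := [p])))
    · rw [htot, h3, contrib_perm p hperm, pvS_append]

lemma B_eq_S (prices : List Int) : maxProfitBrute_alt prices = pvS prices := by
  exact (B_invariant prices).2.2

-- ===== VERDICT (by name: the statement is the Claim_ definition above) =====
theorem maxProfitBrute_spec : Claim_equal_maxProfitBrute := by
  intro prices _
  unfold Spec_maxProfitBrute
  rw [A_eq_S, B_eq_S]
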